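-- pv_equiv track=rewrite | github.com/TryExceptElse/gccforhumans | gfh.py | reduce_templates
-- ===== SOURCE A (Python) =====
-- def reduce_templates(s: str) -> str:
--     level = 0
--     out = ''
--     for c in s:
--         if c == '>':
--             level -= 1
--         if not level:
--             out += c
--         if c == '<':
--             level += 1
--     return out
-- ===== SOURCE B (Python) =====
-- def reduce_templates(s: str) -> str:
--     # prefix balances: value of the bracket counter BEFORE each character
--     bal = []
--     b = 0
--     for c in s:
--         bal.append(b)
--         b += (c == '<') - (c == '>')
--     return ''.join(c for c, l in zip(s, bal) if l == (1 if c == '>' else 0))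
-- ===== Notes on version B (the rewrite author's own statement) =====
-- stated objective: alternative
-- what changed: B splits the work into two passes: a pre-pass building the list of prefix bracket balances, then a zip-filter comprehension keeping a character iff its before-balance is 1 for '>' and 0 otherwise, replacing A's single loop that interleaves a mutating counter with conditional appends.
import Mathlib
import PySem

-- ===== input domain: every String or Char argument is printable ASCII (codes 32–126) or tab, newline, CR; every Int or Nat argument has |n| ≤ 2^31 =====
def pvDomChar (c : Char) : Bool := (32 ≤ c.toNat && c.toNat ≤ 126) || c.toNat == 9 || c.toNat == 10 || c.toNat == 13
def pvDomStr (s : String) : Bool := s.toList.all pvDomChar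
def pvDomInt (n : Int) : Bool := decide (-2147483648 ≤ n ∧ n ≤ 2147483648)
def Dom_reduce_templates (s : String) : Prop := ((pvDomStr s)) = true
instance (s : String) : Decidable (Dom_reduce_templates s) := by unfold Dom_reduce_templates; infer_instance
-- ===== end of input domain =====

-- B: two-pass decomposition (prefix-balance list, then zip-filter) instead of A's single loop with an interleaved mutating counter; same cost.
-- ===== PORT A =====
-- the for-loop of A over the characters, carrying (level, out)
def reduceLoopA : List Char → Int → List Char → List Char
  | [], _, out => out
  | c :: cs, level, out =>
    let level1 := if c = '>' then level - 1 else level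
    let out1 := if level1 = 0 then out ++ [c] else out
    let level2 := if c = '<' then level1 + 1 else level1
    reduceLoopA cs level2 out1

def reduce_templates (s : String) : String := String.mk (reduceLoopA s.toList 0 [])

-- ===== PORT B =====
-- B's pre-pass: the counter value BEFORE each character
def prefixBalances : List Char → Int → List Int
  | [], _ => []
  | c :: cs, b => b :: prefixBalances cs (b + (if c = '<' then 1 else 0) - (if c = '>' then 1 else 0))

def reduce_templates_alt (s : String) : String :=
  String.mk (((s.toList.zip (prefixBalances s.toList 0)).filter
    (fun p => p.2 == (if p.1 = '>' then (1 : Int) else 0))).map Prod.fst)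

-- ===== PRECONDITION & SPEC =====
def Spec_reduce_templates (s : String) (out : String) : Prop := out = reduce_templates_alt s
instance (s : String) (out : String) : Decidable (Spec_reduce_templates s out) := by unfold Spec_reduce_templates; infer_instance

-- ===== CLAIM (what is proved, stated in full; the proofs are below) =====
def Claim_equal_reduce_templates : Prop := ∀ (s : String), Dom_reduce_templates s → Spec_reduce_templates s (reduce_templates s)

-- ===== LEMMAS AND PROOFS =====

-- ===== VERDICT (by name: the statement is the Claim_ definition above) =====
def filtB (cs : List Char) (b : Int) : List Char :=
  ((cs.zip (prefixBalances cs b)).filter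
    (fun p => p.2 == (if p.1 = '>' then (1 : Int) else 0))).map Prod.fst

theorem loopA_eq_filtB (cs : List Char) (lvl : Int) (out : List Char) :
    reduceLoopA cs lvl out = out ++ filtB cs lvl := by
  induction cs generalizing lvl out with
  | nil => simp [reduceLoopA, filtB, prefixBalances]
  | cons c cs ih =>
    simp only [reduceLoopA, filtB, prefixBalances, List.zip_cons_cons, List.filter_cons]
    rw [ih]
    by_cases hgt : c = '>'
    · subst hgt
      by_cases h1 : lvl = 1 <;>
        simp_all [filtB, beq_iff_eq] <;> omega
    · by_cases h0 : lvl = 0 <;>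
        simp_all [filtB, beq_iff_eq] <;>
        split_ifs <;> simp

theorem reduce_templates_spec : Claim_equal_reduce_templates := by
  intro s _
  unfold Spec_reduce_templates reduce_templates reduce_templates_alt
  rw [loopA_eq_filtB]
  rfl
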